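-- pv_equiv track=rewrite | github.com/zamda/HackerRank | Python/unbounded-knapsack.py | solve
-- ===== SOURCE A (Python) =====
-- def solve(test_case):
--     expectedSum = test_case[0]
--     values = test_case[1]
--     solution = [0]
--     for i in range(expectedSum+1):
--         if i in values:
--             solution.append(i)
--         else:
--             for j in range(len(solution) - 1, -1, -1):
--                 if i - solution[j] in values:
--                     solution.append(i)
--                     break
--     return max(solution)
-- ===== SOURCE B (Python) =====
-- def solve(test_case):
--     target, values = test_case
--     vals = {v for v in values if 1 <= v <= target}
--     reach = [True] + [False] * target
--     best = 0
--     for i in range(1, target + 1):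
--         if any(v <= i and reach[i - v] for v in vals):
--             reach[i] = True
--             best = i
--     return best
-- ===== Notes on version B (the rewrite author's own statement) =====
-- stated objective: faster
-- what changed: Replaces A's growing solution list (scanned entirely with linear list membership tests for each i) by a boolean reachability array indexed by sum plus a set of usable values, so each i is decided in O(|values|).
import Mathlib
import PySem

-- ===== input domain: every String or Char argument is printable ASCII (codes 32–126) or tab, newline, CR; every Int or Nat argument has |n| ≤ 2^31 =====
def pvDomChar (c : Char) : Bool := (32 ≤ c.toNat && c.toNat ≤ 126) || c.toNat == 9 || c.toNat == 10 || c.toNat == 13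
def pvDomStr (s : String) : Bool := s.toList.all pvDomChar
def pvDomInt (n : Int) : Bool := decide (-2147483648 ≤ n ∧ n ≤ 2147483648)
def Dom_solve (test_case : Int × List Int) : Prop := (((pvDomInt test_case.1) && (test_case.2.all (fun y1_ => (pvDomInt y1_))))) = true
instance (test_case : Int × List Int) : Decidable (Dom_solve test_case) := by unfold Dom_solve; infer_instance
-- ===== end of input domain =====

-- B replaces A's quadratic scan of the growing `solution` list (with linear `in values`
-- list membership inside) by a boolean reachability table indexed by sum plus a set of
-- usable values, touching each (sum, value) pair once.

-- ===== PORT A =====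
-- body of A's outer loop: append i when i is in values, or when scanning `solution`
-- backwards finds some solution[j] with i - solution[j] in values (the Python `break`
-- only stops the scan early; whether any j matches is what `any` computes, in the same order)
def solveStep (values : List Int) (solution : List Int) (i : Int) : List Int :=
  if values.contains i then solution ++ [i]
  else if (PySem.List.pyRange ((solution.length : Int) - 1) (-1) (-1)).any
            (fun j => values.contains (i - PySem.List.pyGetD solution j 0)) then
    -- solution[j] as pyGetD: j ranges over len(solution)-1 .. 0, always in range
    solution ++ [i]
  else solution

def solve (test_case : Int × List Int) : Int :=
  let solution := (PySem.List.pyRange 0 (test_case.1 + 1) 1).foldl (solveStep test_case.2) [0]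
  -- max(solution): solution starts as [0] and is never emptied, so max never raises
  (PySem.List.max? solution (fun x => x)).getD 0

-- ===== PORT B =====
-- vals = {v for v in values if 1 <= v <= target}
def mkVals (target : Int) (values : List Int) : PySem.Set Int :=
  PySem.Set.ofList (values.filter (fun v => decide (1 ≤ v) && decide (v ≤ target)))

-- body of B's loop over i: state is (reach, best); `any` over the set is order-insensitive
def altStep (vals : PySem.Set Int) (st : List Bool × Int) (i : Int) : List Bool × Int :=
  if vals.any (fun v => decide (v ≤ i) && PySem.List.pyGetD st.1 (i - v) false) then
    -- reach[i - v] and reach[i] = True: indices 0 ≤ i - v ≤ i ≤ target are always in range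
    (PySem.List.pySetD st.1 i true, i)
  else st

def solve_alt (test_case : Int × List Int) : Int :=
  -- reach = [True] + [False] * target  ([False] * n is [] for n ≤ 0, as Int.toNat clamps)
  ((PySem.List.pyRange 1 (test_case.1 + 1) 1).foldl (altStep (mkVals test_case.1 test_case.2))
    (true :: List.replicate test_case.1.toNat false, 0)).2

-- ===== PRECONDITION & SPEC =====
def Spec_solve (test_case : Int × List Int) (out : Int) : Prop := out = solve_alt test_case
instance (test_case : Int × List Int) (out : Int) : Decidable (Spec_solve test_case out) := by unfold Spec_solve; infer_instance

-- ===== CLAIM (what is proved, stated in full; the proofs are below) =====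
def Claim_equal_solve : Prop := ∀ (test_case : Int × List Int), Dom_solve test_case → Spec_solve test_case (solve test_case)

-- ===== LEMMAS AND PROOFS =====

-- Invariant after processing i = 1 .. k: `reach` marks exactly the members of `solution`,
-- all of which lie in [0, k], and `best` is the maximum of `solution`.
def pvInv (T : Int) (k : Int) (sol : List Int) (st : List Bool × Int) : Prop :=
  st.1.length = T.toNat + 1 ∧
  (∀ n : Nat, n ≤ T.toNat → (st.1.getD n false = true ↔ (n : Int) ∈ sol)) ∧
  (∀ s ∈ sol, 0 ≤ s ∧ s ≤ k) ∧
  (0 : Int) ∈ sol ∧ st.2 ∈ sol ∧ (∀ x ∈ sol, x ≤ st.2)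




-- pyGetD at a nonnegative Int index is List.getD at its toNat
lemma pyGetD_int (xs : List Bool) (j : Int) (d : Bool) (hj : 0 ≤ j) :
    PySem.List.pyGetD xs j d = xs.getD j.toNat d := by
  have h : j = ((j.toNat : Nat) : Int) := (Int.toNat_of_nonneg hj).symm
  conv_lhs => rw [h]
  rw [PySem.List.pyGetD_natCast]

lemma getD_set_bool (l : List Bool) (m n : Nat) (hm : m < l.length) :
    (l.set m true).getD n false = if n = m then true else l.getD n false := by
  by_cases h : n = m
  · subst h
    simp [List.getD_eq_getElem?_getD, List.getElem?_set, hm]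
  · simp [List.getD_eq_getElem?_getD, List.getElem?_set, Ne.symm h]
    exact fun h' => absurd h' h

lemma memVals (T : Int) (V : List Int) (v : Int) :
    v ∈ mkVals T V ↔ v ∈ V ∧ 1 ≤ v ∧ v ≤ T := by
  unfold mkVals
  rw [PySem.Set.mem_ofList, List.mem_filter]
  simp

-- A's backwards index scan of `solution` tests the same property as a direct scan of its elements
lemma innerAny (V sol : List Int) (i : Int) :
    ((PySem.List.pyRange ((sol.length : Int) - 1) (-1) (-1)).any
      (fun j => V.contains (i - PySem.List.pyGetD sol j 0)))
      = sol.any (fun s => V.contains (i - s)) := by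
  rw [PySem.List.pyRange_neg_one_eq_reverse]
  have h1 : (-1 : Int) + 1 = 0 := by norm_num
  have h2 : ((sol.length : Int) - 1) + 1 = (sol.length : Int) := by ring
  rw [h1, h2, List.any_reverse]
  conv_rhs => rw [← PySem.List.map_pyGetD_pyRange_zero' (xs := sol) (d := 0)]
  rw [List.any_map]
  rfl

-- the two loop bodies test equivalent conditions and preserve the invariant
lemma stepInv (T : Int) (V : List Int) (a : Int) (sol : List Int) (reach : List Bool)
    (best : Int) (h1 : 1 ≤ a) (h2 : a ≤ T)
    (hInv : pvInv T (a - 1) sol (reach, best)) :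
    pvInv T a (solveStep V sol a) (altStep (mkVals T V) (reach, best) a) := by
  obtain ⟨hlen, hmem, hbnd, h0, hbest, hmax⟩ := hInv
  simp only at hlen hmem hbest hmax
  have hcond : (V.contains a || sol.any (fun s => V.contains (a - s)))
      = (mkVals T V).any (fun v => decide (v ≤ a) && PySem.List.pyGetD reach (a - v) false) := by
    rw [Bool.eq_iff_iff]
    simp only [Bool.or_eq_true, List.any_eq_true, Bool.and_eq_true, decide_eq_true_eq,
      List.contains_eq_mem]
    constructor
    · rintro (hA | ⟨s, hs, hsv⟩)
      · refine ⟨a, (memVals T V a).2 ⟨hA, by omega, h2⟩, le_refl a, ?_⟩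
        have hz : a - a = (0 : Int) := by ring
        rw [hz, PySem.List.pyGetD_zero]
        have := (hmem 0 (Nat.zero_le _))
        simp only [Nat.cast_zero] at this
        simpa [List.getD] using this.2 h0
      · obtain ⟨h0s, hsk⟩ := hbnd s hs
        refine ⟨a - s, (memVals _ _ _).2 ⟨hsv, by omega, by omega⟩, by omega, ?_⟩
        have hz : a - (a - s) = s := by ring
        rw [hz, pyGetD_int _ _ _ (by omega)]
        have := hmem s.toNat (by omega)
        rw [Int.toNat_of_nonneg h0s] at this
        exact this.2 hs
    · rintro ⟨v, hv, hva, hg⟩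
      obtain ⟨hvV, hv1, hvT⟩ := (memVals T V v).1 hv
      right
      refine ⟨a - v, ?_, by simpa using hvV⟩
      rw [pyGetD_int _ _ _ (by omega)] at hg
      have := hmem (a - v).toNat (by omega)
      rw [Int.toNat_of_nonneg (by omega)] at this
      exact this.1 hg
  have hsplit : solveStep V sol a =
      if (V.contains a || sol.any (fun s => V.contains (a - s))) = true then sol ++ [a] else sol := by
    unfold solveStep
    rw [innerAny]
    split_ifs <;> simp_all <;> tauto
  have halt : altStep (mkVals T V) (reach, best) a =
      if ((mkVals T V).any (fun v => decide (v ≤ a) && PySem.List.pyGetD reach (a - v) false)) = true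
      then (PySem.List.pySetD reach a true, a) else (reach, best) := by
    unfold altStep
    rfl
  rw [hsplit, halt, ← hcond]
  by_cases hc : (V.contains a || sol.any (fun s => V.contains (a - s))) = true
  · rw [if_pos hc, if_pos hc]
    have hset : PySem.List.pySetD reach a true = reach.set a.toNat true :=
      PySem.List.pySetD_of_nonneg _ _ (by omega)
    have hca : ((a.toNat : Nat) : Int) = a := Int.toNat_of_nonneg (by omega)
    refine ⟨?_, ?_, ?_, ?_, ?_, ?_⟩
    · simpa [hset] using hlen
    · intro n hn
      simp only [hset]
      rw [getD_set_bool reach a.toNat n (by omega)]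
      by_cases hna : n = a.toNat
      · subst hna
        simp only [List.mem_append, List.mem_singleton, hca] <;> tauto
      · rw [if_neg hna]
        have hne : ((n : Nat) : Int) ≠ a := by omega
        simp only [List.mem_append, List.mem_singleton]
        rw [hmem n hn]
        tauto
    · intro s hs
      rcases List.mem_append.1 hs with hs | hs
      · obtain ⟨hp, hq⟩ := hbnd s hs
        exact ⟨hp, by omega⟩
      · rw [List.mem_singleton] at hs
        subst hs
        exact ⟨by omega, le_refl _⟩
    · exact List.mem_append.2 (Or.inl h0)
    · exact List.mem_append.2 (Or.inr (List.mem_singleton.2 rfl))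
    · intro x hx
      rcases List.mem_append.1 hx with hx | hx
      · have := hmax x hx
        have := (hbnd best hbest).2
        simp only
        omega
      · rw [List.mem_singleton] at hx
        simp [hx]
  · rw [if_neg hc, if_neg hc]
    refine ⟨hlen, hmem, ?_, h0, hbest, hmax⟩
    intro s hs
    obtain ⟨hp, hq⟩ := hbnd s hs
    exact ⟨hp, by omega⟩

lemma loopInv (T : Int) (V : List Int) :
    ∀ (n : Nat) (a : Int) (sol : List Int) (reach : List Bool) (best : Int),
      1 ≤ a → (T + 1 - a).toNat = n → pvInv T (a - 1) sol (reach, best) →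
      (((PySem.List.pyRange a (T + 1) 1).foldl (altStep (mkVals T V)) (reach, best)).2
          ∈ (PySem.List.pyRange a (T + 1) 1).foldl (solveStep V) sol ∧
        ∀ x ∈ (PySem.List.pyRange a (T + 1) 1).foldl (solveStep V) sol,
          x ≤ ((PySem.List.pyRange a (T + 1) 1).foldl (altStep (mkVals T V)) (reach, best)).2) := by
  intro n
  induction n with
  | zero =>
    intro a sol reach best h1 hn hInv
    rw [PySem.List.pyRange_one_eq_nil (by omega)]
    simp only [List.foldl_nil]
    exact ⟨hInv.2.2.2.2.1, hInv.2.2.2.2.2⟩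
  | succ m ih =>
    intro a sol reach best h1 hn hInv
    by_cases hle : T + 1 ≤ a
    · rw [PySem.List.pyRange_one_eq_nil hle]
      simp only [List.foldl_nil]
      exact ⟨hInv.2.2.2.2.1, hInv.2.2.2.2.2⟩
    · rw [PySem.List.pyRange_one_cons (by omega)]
      simp only [List.foldl_cons]
      have hstep := stepInv T V a sol reach best h1 (by omega) hInv
      rcases hA : altStep (mkVals T V) (reach, best) a with ⟨r', b'⟩
      rw [hA] at hstep
      have hInv' : pvInv T (a + 1 - 1) (solveStep V sol a) (r', b') := by
        have : a + 1 - 1 = a := by ring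
        rw [this]
        exact hstep
      exact ih (a + 1) (solveStep V sol a) r' b' (by omega) (by omega) hInv'

theorem solve_eq (T : Int) (V : List Int) : solve (T, V) = solve_alt (T, V) := by
  unfold solve solve_alt
  simp only
  by_cases hT : T + 1 ≤ 0
  · rw [PySem.List.pyRange_one_eq_nil hT,
      PySem.List.pyRange_one_eq_nil (show T + 1 ≤ 1 by omega)]
    rfl
  · rw [PySem.List.pyRange_one_cons (show (0 : Int) < T + 1 by omega)]
    simp only [List.foldl_cons, zero_add]
    have h0 : solveStep V [0] 0 = if V.contains 0 then [0, 0] else [0] := by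
      unfold solveStep
      rw [innerAny]
      by_cases h : V.contains 0 = true
      · simp [h]
      · simp [h]
    have hInv0 : pvInv T (1 - 1) (solveStep V [0] 0) (true :: List.replicate T.toNat false, 0) := by
      rw [h0]
      refine ⟨by simp, ?_, ?_, ?_, ?_, ?_⟩
      · intro n hn
        cases n with
        | zero =>
          simp only [List.getD_cons_zero, Nat.cast_zero]
          split_ifs <;> simp
        | succ m =>
          simp only [List.getD_cons_succ]
          have hrep : (List.replicate T.toNat false).getD m false = false := by
            rcases lt_or_ge m T.toNat with hlt | hge
            · simp [List.getD_eq_getElem?_getD, List.getElem?_replicate, hlt]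
            · rw [List.getD_eq_default _ _ (by simpa using hge)]
          rw [hrep]
          have : ((m + 1 : Nat) : Int) ≠ 0 := by omega
          split_ifs <;> simp_all <;> tauto
      · intro s hs
        split_ifs at hs <;> simp_all
      · split_ifs <;> simp
      · split_ifs <;> simp
      · intro x hx
        split_ifs at hx <;> simp_all
    obtain ⟨hmem', hmax'⟩ :=
      loopInv T V (T + 1 - 1).toNat 1 (solveStep V [0] 0)
        (true :: List.replicate T.toNat false) 0 (le_refl 1) rfl hInv0
    set sol' := (PySem.List.pyRange 1 (T + 1) 1).foldl (solveStep V) (solveStep V [0] 0) with hsol'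
    set best' := ((PySem.List.pyRange 1 (T + 1) 1).foldl (altStep (mkVals T V))
      (true :: List.replicate T.toNat false, 0)).2 with hbest'
    obtain ⟨mx, hmx⟩ : ∃ mx, PySem.List.max? sol' (fun x => x) = some mx := by
      cases hmxe : PySem.List.max? sol' (fun x => x) with
      | none =>
        rw [PySem.List.max?_eq_none_iff] at hmxe
        rw [hmxe] at hmem'
        exact absurd hmem' (List.not_mem_nil)
      | some m => exact ⟨m, rfl⟩
    have hm1 : mx ∈ sol' := PySem.List.max?_mem hmx
    have hm2 : best' ≤ mx := PySem.List.max?_isMax hmx best' hmem'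
    have hmxb : mx = best' := le_antisymm (hmax' mx hm1) hm2
    rw [hmx]
    simp [hmxb]


-- ===== VERDICT (by name: the statement is the Claim_ definition above) =====
theorem solve_spec : Claim_equal_solve := by
  intro tc _
  unfold Spec_solve
  exact solve_eq tc.1 tc.2 ▸ (by cases tc; rfl)
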